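-- pv_equiv track=rewrite | github.com/SergioAle210/Syntax-Par | yapar/parser.py | split_by_whitespace
-- ===== SOURCE A (Python) =====
-- def split_by_whitespace(cadena: str) -> list[str]:
--     """Divide por cualquier espacio en blanco (equiv. a str.split sin argumento)."""
--     palabras = []
--     actual = ""
--     for ch in cadena:
--         if ch in (" ", "\t", "\n", "\r"):
--             if actual:
--                 palabras.append(actual)
--                 actual = ""
--         else:
--             actual += ch
--     if actual:
--         palabras.append(actual)
--     return palabras
-- ===== SOURCE B (Python) =====
-- def split_by_whitespace(cadena: str) -> list[str]:
--     """Divide por cualquier espacio en blanco (equiv. a str.split sin argumento)."""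
--     palabras = []
--     i = 0
--     n = len(cadena)
--     while i < n:
--         if cadena[i] in (" ", "\t", "\n", "\r"):
--             i += 1
--         else:
--             j = i + 1
--             while j < n and cadena[j] not in (" ", "\t", "\n", "\r"):
--                 j += 1
--             palabras.append(cadena[i:j])
--             i = j
--     return palabras
-- ===== Notes on version B (the rewrite author's own statement) =====
-- stated objective: alternative
-- what changed: Replaces A's char-by-char loop with a growing current-token buffer by an index-based scan that skips a delimiter or finds the end of the maximal non-delimiter run and slices the whole token out at once; no accumulator string is maintained.
import Mathlib
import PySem

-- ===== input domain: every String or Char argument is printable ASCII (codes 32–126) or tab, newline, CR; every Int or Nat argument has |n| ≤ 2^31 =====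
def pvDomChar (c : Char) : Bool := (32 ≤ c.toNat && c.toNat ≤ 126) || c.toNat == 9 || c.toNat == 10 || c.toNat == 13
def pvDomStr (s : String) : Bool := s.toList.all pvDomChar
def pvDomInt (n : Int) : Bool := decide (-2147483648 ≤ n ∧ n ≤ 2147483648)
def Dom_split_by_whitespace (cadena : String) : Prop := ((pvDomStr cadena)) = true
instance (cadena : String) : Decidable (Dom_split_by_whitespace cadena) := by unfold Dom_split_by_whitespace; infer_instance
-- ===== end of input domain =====

-- B replaces A's per-character accumulator loop by an index/run-based scan that slices
-- each maximal non-delimiter run out as one token (objective: alternative, same cost).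

-- ===== PORT A =====
-- A's loop: palabras/actual accumulator; actual kept as List Char, flushed as a String.
def pvALoop : List Char → List String → List Char → List String
  | [], palabras, actual =>
      if actual = [] then palabras else palabras ++ [String.mk actual]
  | ch :: rest, palabras, actual =>
      if ch == ' ' || ch == '\t' || ch == '\n' || ch == '\r' then
        if actual = [] then pvALoop rest palabras []
        else pvALoop rest (palabras ++ [String.mk actual]) []
      else pvALoop rest palabras (actual ++ [ch])

def split_by_whitespace (cadena : String) : List String :=
  pvALoop cadena.toList [] []

-- ===== PORT B =====
def pvBDelim (c : Char) : Bool := c == ' ' || c == '\t' || c == '\n' || c == '\r'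

-- B's scan: skip a delimiter, or take the maximal non-delimiter run as one token.
def pvBTokens : List Char → List String
  | [] => []
  | c :: cs =>
      if pvBDelim c then pvBTokens cs
      else
        String.mk (c :: cs.takeWhile (fun d => !pvBDelim d)) ::
          pvBTokens (cs.dropWhile (fun d => !pvBDelim d))
  termination_by l => l.length
  decreasing_by
    · simp
    · exact Nat.lt_succ_of_le (List.length_dropWhile_le _ _)

def split_by_whitespace_alt (cadena : String) : List String :=
  pvBTokens cadena.toList

-- ===== PRECONDITION & SPEC =====
def Spec_split_by_whitespace (cadena : String) (out : List String) : Prop := out = split_by_whitespace_alt cadena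
instance (cadena : String) (out : List String) : Decidable (Spec_split_by_whitespace cadena out) := by unfold Spec_split_by_whitespace; infer_instance

-- ===== CLAIM (what is proved, stated in full; the proofs are below) =====
def Claim_equal_split_by_whitespace : Prop := ∀ (cadena : String), Dom_split_by_whitespace cadena → Spec_split_by_whitespace cadena (split_by_whitespace cadena)

-- ===== LEMMAS AND PROOFS =====

theorem pv_takeWhile_nws (ds : List Char) (h : ∀ d ∈ ds, pvBDelim d = false)
    (c : Char) (cs : List Char) (hc : pvBDelim c = true) :
    (ds ++ c :: cs).takeWhile (fun d => !pvBDelim d) = ds := by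
  induction ds with
  | nil => simp [List.takeWhile, hc]
  | cons d ds ih =>
      have hd : pvBDelim d = false := h d (by simp)
      simp only [List.cons_append, List.takeWhile_cons, hd]
      simp [ih (fun x hx => h x (by simp [hx]))]

theorem pv_dropWhile_nws (ds : List Char) (h : ∀ d ∈ ds, pvBDelim d = false)
    (c : Char) (cs : List Char) (hc : pvBDelim c = true) :
    (ds ++ c :: cs).dropWhile (fun d => !pvBDelim d) = c :: cs := by
  induction ds with
  | nil => simp [List.dropWhile, hc]
  | cons d ds ih =>
      have hd : pvBDelim d = false := h d (by simp)
      simp only [List.cons_append, List.dropWhile_cons, hd]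
      simp [ih (fun x hx => h x (by simp [hx]))]

theorem pv_tokens_nws (ds : List Char) (h : ∀ d ∈ ds, pvBDelim d = false) (hne : ds ≠ []) :
    pvBTokens ds = [String.mk ds] := by
  cases ds with
  | nil => exact absurd rfl hne
  | cons d ds =>
      have hd : pvBDelim d = false := h d (by simp)
      rw [pvBTokens, if_neg (by simp [hd])]
      have ht : ds.takeWhile (fun d => !pvBDelim d) = ds :=
        List.takeWhile_eq_self_iff.mpr (fun x hx => by simp [h x (by simp [hx])])
      have hdr : ds.dropWhile (fun d => !pvBDelim d) = [] :=
        List.dropWhile_eq_nil_iff.mpr (fun x hx => by simp [h x (by simp [hx])])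
      simp [ht, hdr, pvBTokens]

theorem pvALoop_eq (l : List Char) :
    ∀ (acc : List String) (cur : List Char), (∀ d ∈ cur, pvBDelim d = false) →
      pvALoop l acc cur = acc ++ pvBTokens (cur ++ l) := by
  induction l with
  | nil =>
      intro acc cur h
      rw [pvALoop]
      by_cases hc : cur = []
      · simp [hc, pvBTokens]
      · simp [hc, pv_tokens_nws cur h hc]
  | cons c cs ih =>
      intro acc cur h
      rw [pvALoop]
      by_cases hws : pvBDelim c = true
      · rw [if_pos (by simpa [pvBDelim] using hws)]
        by_cases hc : cur = []
        · subst hc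
          rw [if_pos rfl, ih acc [] (by simp)]
          simp [pvBTokens, hws]
        · rw [if_neg hc, ih _ [] (by simp)]
          cases cur with
          | nil => exact absurd rfl hc
          | cons d ds =>
              have hd : pvBDelim d = false := h d (by simp)
              rw [List.cons_append, pvBTokens, if_neg (by simp [hd])]
              rw [pv_takeWhile_nws ds (fun x hx => h x (by simp [hx])) c cs hws,
                  pv_dropWhile_nws ds (fun x hx => h x (by simp [hx])) c cs hws]
              simp [pvBTokens, hws]
      · have hws' : pvBDelim c = false := by simpa using hws
        rw [if_neg (by simpa [pvBDelim] using hws)]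
        rw [ih acc (cur ++ [c]) (by intro d hd; rcases List.mem_append.1 hd with h1 | h1
                                    · exact h d h1
                                    · simp at h1; simpa [h1] using hws')]
        simp

-- ===== VERDICT (by name: the statement is the Claim_ definition above) =====
theorem split_by_whitespace_spec : Claim_equal_split_by_whitespace := by
  intro cadena _
  unfold Spec_split_by_whitespace split_by_whitespace split_by_whitespace_alt
  simpa using pvALoop_eq cadena.toList [] [] (by simp)
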